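-- pv_equiv track=rewrite | github.com/tcozzib/TPgrupal-NicolasAristidesTomas | biblioteca.py | todasEnLaMismaFila
-- ===== SOURCE A (Python) =====
-- Posición = tuple[str,int]            # una ubicación de una grilla, dada por una letra y un número
--
-- def letraDePosición(posición: Posición) -> str:
--     """ Describe la letra de la posición *posición*. """
--     return posición[0]
--
-- def todasEnLaMismaFila(posiciones: list[Posición]) -> bool:
--     """ Indica si todas las posiciones en *posiciones* pertenecen a la misma fila.
--         PRE: sonPosicionesVálidas(posiciones)
--     """
--     if len(posiciones) == 0:
--         return True
--     letraDeFila = letraDePosición(posiciones[0])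
--     posiciónActual = 1
--     while posiciónActual < len(posiciones) and letraDePosición(posiciones[posiciónActual]) == letraDeFila:
--         posiciónActual += 1
--     return posiciónActual == len(posiciones)
-- ===== SOURCE B (Python) =====
-- def letraDePosicion(posicion):
--     return posicion[0]
--
-- def todasEnLaMismaFila(posiciones):
--     """ B: collect the distinct row letters into a set and check its cardinality. """
--     return len({letraDePosicion(p) for p in posiciones}) <= 1
-- ===== Notes on version B (the rewrite author's own statement) =====
-- stated objective: idiomatic
-- what changed: Replaces the indexed early-exit while-loop with a set comprehension over all row letters followed by a cardinality check (len <= 1).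
import Mathlib
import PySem

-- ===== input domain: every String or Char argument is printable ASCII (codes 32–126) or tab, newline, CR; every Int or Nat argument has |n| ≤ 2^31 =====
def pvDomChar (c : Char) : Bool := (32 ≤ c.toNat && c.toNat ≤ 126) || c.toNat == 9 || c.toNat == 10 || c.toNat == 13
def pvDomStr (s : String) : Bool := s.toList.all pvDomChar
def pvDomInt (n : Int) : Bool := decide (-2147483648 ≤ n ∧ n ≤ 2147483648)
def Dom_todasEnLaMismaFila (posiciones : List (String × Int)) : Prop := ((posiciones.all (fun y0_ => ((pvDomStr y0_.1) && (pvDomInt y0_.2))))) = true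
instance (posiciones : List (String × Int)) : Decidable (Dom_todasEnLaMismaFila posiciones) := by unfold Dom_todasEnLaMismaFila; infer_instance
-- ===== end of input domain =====

-- B replaces A's indexed early-exit while-loop by collecting the distinct row letters
-- into a set and checking its cardinality (objective: idiomatic; same cost).

-- ===== PORT A =====
def letraDePosicion (posicion : String × Int) : String := posicion.1

-- the while-loop of A: advance posiciónActual while in range and the letter matches
def tlfLoop (posiciones : List (String × Int)) (letraDeFila : String) (i : Nat) : Nat :=
  if h : i < posiciones.length ∧ letraDePosicion (posiciones.getD i ("", 0)) = letraDeFila then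
    tlfLoop posiciones letraDeFila (i + 1)
  else i
termination_by posiciones.length - i
decreasing_by omega

def todasEnLaMismaFila (posiciones : List (String × Int)) : Bool :=
  if posiciones.length = 0 then true
  else
    let letraDeFila := letraDePosicion (posiciones.getD 0 ("", 0))
    decide (tlfLoop posiciones letraDeFila 1 = posiciones.length)

-- ===== PORT B =====
def todasEnLaMismaFila_alt (posiciones : List (String × Int)) : Bool :=
  decide ((PySem.Set.ofList (posiciones.map letraDePosicion)).length ≤ 1)

-- ===== PRECONDITION & SPEC =====
def Spec_todasEnLaMismaFila (posiciones : List (String × Int)) (out : Bool) : Prop := out = todasEnLaMismaFila_alt posiciones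
instance (posiciones : List (String × Int)) (out : Bool) : Decidable (Spec_todasEnLaMismaFila posiciones out) := by unfold Spec_todasEnLaMismaFila; infer_instance

-- ===== CLAIM (what is proved, stated in full; the proofs are below) =====
def Claim_equal_todasEnLaMismaFila : Prop := ∀ (posiciones : List (String × Int)), Dom_todasEnLaMismaFila posiciones → Spec_todasEnLaMismaFila posiciones (todasEnLaMismaFila posiciones)

-- ===== LEMMAS AND PROOFS =====

-- A's loop reaches the end iff every remaining element has the row letter
theorem tlfLoop_aux (ps : List (String × Int)) (letra : String) :
    ∀ n i, i ≤ ps.length → ps.length - i ≤ n →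
      (tlfLoop ps letra i = ps.length ↔ ∀ q ∈ ps.drop i, q.1 = letra) := by
  intro n
  induction n with
  | zero =>
    intro i hle hn
    have hi : i = ps.length := by omega
    subst hi
    rw [tlfLoop, dif_neg (by omega)]
    simp
  | succ n ih =>
    intro i hle hn
    rcases Nat.lt_or_ge i ps.length with hi | hi
    · have hdrop : ps.drop i = ps[i] :: ps.drop (i + 1) := List.drop_eq_getElem_cons hi
      have hget : ps.getD i ("", 0) = ps[i] := by
        simp [List.getD, List.getElem?_eq_getElem hi]
      by_cases hl : letraDePosicion (ps.getD i ("", 0)) = letra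
      · rw [tlfLoop, dif_pos ⟨hi, hl⟩, ih (i + 1) (by omega) (by omega), hdrop]
        simp only [List.mem_cons]
        constructor
        · intro hall q hq
          rcases hq with rfl | hq
          · rw [← hget]; exact hl
          · exact hall q hq
        · intro hall q hq; exact hall q (Or.inr hq)
      · rw [tlfLoop, dif_neg (by tauto)]
        constructor
        · intro h; omega
        · intro hall
          exact absurd (by rw [hget]; exact hall _ (hdrop ▸ List.mem_cons_self ..)) hl
    · have hi : i = ps.length := by omega
      subst hi
      rw [tlfLoop, dif_neg (by omega)]
      simp

-- a duplicate-free list has at most one element iff all its members coincide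
theorem nodup_length_le_one {α : Type} (l : List α) (hnd : l.Nodup) :
    l.length ≤ 1 ↔ ∀ x ∈ l, ∀ y ∈ l, x = y := by
  match l, hnd with
  | [], _ => simp
  | [a], _ => simp
  | a :: b :: t, hnd =>
    constructor
    · intro h; simp at h
    · intro hall
      exfalso
      have hab : a = b := hall a (by simp) b (by simp)
      exact (List.nodup_cons.mp hnd).1 (hab ▸ List.mem_cons_self ..)

-- ===== VERDICT (by name: the statement is the Claim_ definition above) =====
theorem todasEnLaMismaFila_spec : Claim_equal_todasEnLaMismaFila := by
  intro posiciones _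
  unfold Spec_todasEnLaMismaFila todasEnLaMismaFila todasEnLaMismaFila_alt
  match posiciones with
  | [] => simp [PySem.Set.ofList]
  | p :: rest =>
    rw [if_neg (by simp)]
    have hA := tlfLoop_aux (p :: rest) (letraDePosicion p)
      ((p :: rest).length) 1 (by simp) (by omega)
    have hB := nodup_length_le_one (PySem.Set.ofList ((p :: rest).map letraDePosicion))
      (PySem.Set.nodup_ofList _)
    rw [Bool.eq_iff_iff]
    simp only [decide_eq_true_iff, List.getD_cons_zero]
    rw [hA, hB]
    simp only [PySem.Set.mem_ofList, List.mem_map, List.drop_one, List.tail_cons]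
    constructor
    · rintro hall x ⟨qx, hqx, rfl⟩ y ⟨qy, hqy, rfl⟩
      have hx : letraDePosicion qx = letraDePosicion p := by
        rcases List.mem_cons.mp hqx with rfl | h
        · rfl
        · exact hall qx h
      have hy : letraDePosicion qy = letraDePosicion p := by
        rcases List.mem_cons.mp hqy with rfl | h
        · rfl
        · exact hall qy h
      rw [hx, hy]
    · intro hall q hq
      exact hall (letraDePosicion q) ⟨q, List.mem_cons_of_mem _ hq, rfl⟩
        (letraDePosicion p) ⟨p, List.mem_cons_self .., rfl⟩
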